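-- pv_equiv track=rewrite | github.com/InformaticsResearchCenter/ITeung | module/cek_nilai.py | convertKelas
-- ===== SOURCE A (Python) =====
-- import string
--
-- def convertKelas(kelas):
--     kelas = kelas.lower()
--     list_kelas = list(string.ascii_lowercase)
--     list_nomor = list(range(1, 27))
--     dict_kelas = dict(zip(list_nomor, list_kelas))
--     for k, v in dict_kelas.items():
--         if v == kelas:
--             return str(k).zfill(2)
--             break
--     return '00'
-- ===== SOURCE B (Python) =====
-- import string
--
-- def convertKelas(kelas):
--     kelas = kelas.lower()
--     if len(kelas) == 1 and kelas in string.ascii_lowercase: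
--         return str(ord(kelas) - ord('a') + 1).zfill(2)
--     return '00'
-- ===== Notes on version B (the rewrite author's own statement) =====
-- stated objective: simpler
-- what changed: Replaced the dict built from zip(range(1,27), ascii_lowercase) and its linear scan by a closed-form arithmetic mapping ord(k)-96 guarded by a single-lowercase-letter check.
import Mathlib
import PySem

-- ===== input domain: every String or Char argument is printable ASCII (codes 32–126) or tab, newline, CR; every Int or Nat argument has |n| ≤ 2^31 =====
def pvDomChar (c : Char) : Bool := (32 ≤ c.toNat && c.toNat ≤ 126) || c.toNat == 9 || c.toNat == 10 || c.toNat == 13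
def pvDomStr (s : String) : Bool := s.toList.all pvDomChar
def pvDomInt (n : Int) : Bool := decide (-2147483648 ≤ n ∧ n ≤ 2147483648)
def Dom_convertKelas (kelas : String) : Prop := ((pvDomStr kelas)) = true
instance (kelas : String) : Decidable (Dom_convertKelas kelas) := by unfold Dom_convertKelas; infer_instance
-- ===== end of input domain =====

-- B replaces A's dict-of-26-letters scan by the closed-form arithmetic mapping ord(k) - 96 (objective: simpler).

-- ===== PORT A =====
-- the 'for k, v in dict_kelas.items(): if v == kelas: return str(k).zfill(2)' loop; falls through to '00'
def convLoop (kel : String) : List (Int × String) → String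
  | [] => "00"
  | (k, v) :: rest => if v = kel then PySem.Str.zfill (PySem.Int.toStr k) 2 else convLoop kel rest

def convertKelas (kelas : String) : String :=
  let kelas := PySem.Str.lower kelas
  let list_kelas := "abcdefghijklmnopqrstuvwxyz".toList.map (fun c => String.ofList [c])
  let list_nomor := PySem.List.pyRange 1 27 1
  let dict_kelas := list_nomor.zip list_kelas
  convLoop kelas dict_kelas

-- ===== PORT B =====
-- len(kelas) == 1 and kelas in string.ascii_lowercase  ↦  the single char c with 'a' ≤ c ≤ 'z'
def convertKelas_alt (kelas : String) : String :=
  let k := PySem.Str.lower kelas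
  match k.toList with
  | [c] => if 'a' ≤ c ∧ c ≤ 'z' then PySem.Str.zfill (PySem.Int.toStr ((c.toNat : Int) - 97 + 1)) 2 else "00"
  | _ => "00"

-- ===== PRECONDITION & SPEC =====
def Spec_convertKelas (kelas : String) (out : String) : Prop := out = convertKelas_alt kelas
instance (kelas : String) (out : String) : Decidable (Spec_convertKelas kelas out) := by unfold Spec_convertKelas; infer_instance

-- ===== CLAIM (what is proved, stated in full; the proofs are below) =====
def Claim_equal_convertKelas : Prop := ∀ (kelas : String), Dom_convertKelas kelas → Spec_convertKelas kelas (convertKelas kelas)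

-- ===== LEMMAS AND PROOFS =====

-- A's dict, evaluated to a literal association list
theorem dict_eq :
    (PySem.List.pyRange 1 27 1).zip ("abcdefghijklmnopqrstuvwxyz".toList.map (fun c => String.ofList [c]))
    = [(1, "a"), (2, "b"), (3, "c"), (4, "d"), (5, "e"), (6, "f"), (7, "g"), (8, "h"), (9, "i"), (10, "j"), (11, "k"), (12, "l"), (13, "m"), (14, "n"), (15, "o"), (16, "p"), (17, "q"), (18, "r"), (19, "s"), (20, "t"), (21, "u"), (22, "v"), (23, "w"), (24, "x"), (25, "y"), (26, "z")] := by decide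

-- A's scan over the 26-entry dict agrees with B's closed form, for every possible list of chars
theorem core_lemma (l : List Char) :
    convLoop (String.ofList l) [(1, "a"), (2, "b"), (3, "c"), (4, "d"), (5, "e"), (6, "f"), (7, "g"), (8, "h"), (9, "i"), (10, "j"), (11, "k"), (12, "l"), (13, "m"), (14, "n"), (15, "o"), (16, "p"), (17, "q"), (18, "r"), (19, "s"), (20, "t"), (21, "u"), (22, "v"), (23, "w"), (24, "x"), (25, "y"), (26, "z")]
    = match l with
      | [c] => if 'a' ≤ c ∧ c ≤ 'z' then PySem.Str.zfill (PySem.Int.toStr ((c.toNat : Int) - 97 + 1)) 2 else "00"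
      | _ => "00" := by
  match l with
  | [] => decide
  | c :: d :: r => simp [convLoop, String.ext_iff]
  | [c] =>
  by_cases h1 : c = 'a'
  · subst h1; decide
  by_cases h2 : c = 'b'
  · subst h2; decide
  by_cases h3 : c = 'c'
  · subst h3; decide
  by_cases h4 : c = 'd'
  · subst h4; decide
  by_cases h5 : c = 'e'
  · subst h5; decide
  by_cases h6 : c = 'f'
  · subst h6; decide
  by_cases h7 : c = 'g'
  · subst h7; decide
  by_cases h8 : c = 'h'
  · subst h8; decide
  by_cases h9 : c = 'i'
  · subst h9; decide
  by_cases h10 : c = 'j'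
  · subst h10; decide
  by_cases h11 : c = 'k'
  · subst h11; decide
  by_cases h12 : c = 'l'
  · subst h12; decide
  by_cases h13 : c = 'm'
  · subst h13; decide
  by_cases h14 : c = 'n'
  · subst h14; decide
  by_cases h15 : c = 'o'
  · subst h15; decide
  by_cases h16 : c = 'p'
  · subst h16; decide
  by_cases h17 : c = 'q'
  · subst h17; decide
  by_cases h18 : c = 'r'
  · subst h18; decide
  by_cases h19 : c = 's'
  · subst h19; decide
  by_cases h20 : c = 't'
  · subst h20; decide
  by_cases h21 : c = 'u'
  · subst h21; decide
  by_cases h22 : c = 'v'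
  · subst h22; decide
  by_cases h23 : c = 'w'
  · subst h23; decide
  by_cases h24 : c = 'x'
  · subst h24; decide
  by_cases h25 : c = 'y'
  · subst h25; decide
  by_cases h26 : c = 'z'
  · subst h26; decide
  ·   simp [convLoop, String.ext_iff, eq_comm, h1, h2, h3, h4, h5, h6, h7, h8, h9, h10, h11, h12, h13, h14, h15, h16, h17, h18, h19, h20, h21, h22, h23, h24, h25, h26]
      intro hl hr
      exfalso
      have l1 : 97 ≤ c.toNat := hl
      have l2 : c.toNat ≤ 122 := hr
      have e1 : c.toNat ≠ 97 := fun he => h1 (Char.ext (UInt32.toNat_inj.mp he))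
      have e2 : c.toNat ≠ 98 := fun he => h2 (Char.ext (UInt32.toNat_inj.mp he))
      have e3 : c.toNat ≠ 99 := fun he => h3 (Char.ext (UInt32.toNat_inj.mp he))
      have e4 : c.toNat ≠ 100 := fun he => h4 (Char.ext (UInt32.toNat_inj.mp he))
      have e5 : c.toNat ≠ 101 := fun he => h5 (Char.ext (UInt32.toNat_inj.mp he))
      have e6 : c.toNat ≠ 102 := fun he => h6 (Char.ext (UInt32.toNat_inj.mp he))
      have e7 : c.toNat ≠ 103 := fun he => h7 (Char.ext (UInt32.toNat_inj.mp he))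
      have e8 : c.toNat ≠ 104 := fun he => h8 (Char.ext (UInt32.toNat_inj.mp he))
      have e9 : c.toNat ≠ 105 := fun he => h9 (Char.ext (UInt32.toNat_inj.mp he))
      have e10 : c.toNat ≠ 106 := fun he => h10 (Char.ext (UInt32.toNat_inj.mp he))
      have e11 : c.toNat ≠ 107 := fun he => h11 (Char.ext (UInt32.toNat_inj.mp he))
      have e12 : c.toNat ≠ 108 := fun he => h12 (Char.ext (UInt32.toNat_inj.mp he))
      have e13 : c.toNat ≠ 109 := fun he => h13 (Char.ext (UInt32.toNat_inj.mp he))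
      have e14 : c.toNat ≠ 110 := fun he => h14 (Char.ext (UInt32.toNat_inj.mp he))
      have e15 : c.toNat ≠ 111 := fun he => h15 (Char.ext (UInt32.toNat_inj.mp he))
      have e16 : c.toNat ≠ 112 := fun he => h16 (Char.ext (UInt32.toNat_inj.mp he))
      have e17 : c.toNat ≠ 113 := fun he => h17 (Char.ext (UInt32.toNat_inj.mp he))
      have e18 : c.toNat ≠ 114 := fun he => h18 (Char.ext (UInt32.toNat_inj.mp he))
      have e19 : c.toNat ≠ 115 := fun he => h19 (Char.ext (UInt32.toNat_inj.mp he))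
      have e20 : c.toNat ≠ 116 := fun he => h20 (Char.ext (UInt32.toNat_inj.mp he))
      have e21 : c.toNat ≠ 117 := fun he => h21 (Char.ext (UInt32.toNat_inj.mp he))
      have e22 : c.toNat ≠ 118 := fun he => h22 (Char.ext (UInt32.toNat_inj.mp he))
      have e23 : c.toNat ≠ 119 := fun he => h23 (Char.ext (UInt32.toNat_inj.mp he))
      have e24 : c.toNat ≠ 120 := fun he => h24 (Char.ext (UInt32.toNat_inj.mp he))
      have e25 : c.toNat ≠ 121 := fun he => h25 (Char.ext (UInt32.toNat_inj.mp he))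
      have e26 : c.toNat ≠ 122 := fun he => h26 (Char.ext (UInt32.toNat_inj.mp he))
      omega

-- ===== VERDICT (by name: the statement is the Claim_ definition above) =====
theorem convertKelas_spec : Claim_equal_convertKelas := by
  intro kelas _
  unfold Spec_convertKelas convertKelas convertKelas_alt
  simp only [dict_eq]
  have h := core_lemma (PySem.Str.lower kelas).toList
  rw [String.ofList_toList] at h
  exact h
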